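-- pv_equiv track=rewrite | github.com/SwiftyDMax/Catan- | Catan2/server/server.py | dfs_longest_path
-- ===== SOURCE A (Python) =====
-- def is_blocked_vertex(game, vertex, username):
--     owner = game["settlements"].get(vertex) or game["cities"].get(vertex)
--
--     return owner is not None and owner != username
--
-- def dfs_longest_path(game, graph, current, visited_edges, username):
--     max_length = 0
--
--     for neighbor in graph.get(current, []):
--         edge = tuple(sorted((current, neighbor)))
--
--         if edge in visited_edges:
--             continue
--
--         # ❌ can't pass through enemy settlement
--         if is_blocked_vertex(game, neighbor, username):
--             continue
--
--         visited_edges.add(edge)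
--
--         length = 1 + dfs_longest_path(
--             game,
--             graph,
--             neighbor,
--             visited_edges,
--             username
--         )
--
--         max_length = max(max_length, length)
--
--         visited_edges.remove(edge)
--
--     return max_length
-- ===== SOURCE B (Python) =====
-- def dfs_longest_path(game, graph, current, visited_edges, username):
--     def blocked(v):
--         owner = game["settlements"].get(v) or game["cities"].get(v)
--         return owner is not None and owner != username
--
--     best = 0
--     depth = 0
--     stack = [(current, iter(graph.get(current, [])), None)]
--     while stack:
--         vertex, neighbors, edge_in = stack[-1]
--         for neighbor in neighbors:
--             edge = tuple(sorted((vertex, neighbor)))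
--             if edge in visited_edges or blocked(neighbor):
--                 continue
--             visited_edges.add(edge)
--             depth += 1
--             if depth > best:
--                 best = depth
--             stack.append((neighbor, iter(graph.get(neighbor, [])), edge))
--             break
--         else:
--             stack.pop()
--             if edge_in is not None:
--                 visited_edges.remove(edge_in)
--                 depth -= 1
--     return best
-- ===== Notes on version B (the rewrite author's own statement) =====
-- stated objective: alternative
-- what changed: The recursive backtracking DFS is replaced by an iterative search over an explicit stack of frames (vertex, remaining-neighbor iterator, incoming edge) that tracks the current depth and a running maximum, marking an edge visited on push and unmarking it on pop.
-- outside the precondition, e.g. on dfs_longest_path({'settlements': {'b': 'u'}}, {'a': ['b']}, 'a', set(), 'u'): A returns 1, B returns 1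
import Mathlib
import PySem

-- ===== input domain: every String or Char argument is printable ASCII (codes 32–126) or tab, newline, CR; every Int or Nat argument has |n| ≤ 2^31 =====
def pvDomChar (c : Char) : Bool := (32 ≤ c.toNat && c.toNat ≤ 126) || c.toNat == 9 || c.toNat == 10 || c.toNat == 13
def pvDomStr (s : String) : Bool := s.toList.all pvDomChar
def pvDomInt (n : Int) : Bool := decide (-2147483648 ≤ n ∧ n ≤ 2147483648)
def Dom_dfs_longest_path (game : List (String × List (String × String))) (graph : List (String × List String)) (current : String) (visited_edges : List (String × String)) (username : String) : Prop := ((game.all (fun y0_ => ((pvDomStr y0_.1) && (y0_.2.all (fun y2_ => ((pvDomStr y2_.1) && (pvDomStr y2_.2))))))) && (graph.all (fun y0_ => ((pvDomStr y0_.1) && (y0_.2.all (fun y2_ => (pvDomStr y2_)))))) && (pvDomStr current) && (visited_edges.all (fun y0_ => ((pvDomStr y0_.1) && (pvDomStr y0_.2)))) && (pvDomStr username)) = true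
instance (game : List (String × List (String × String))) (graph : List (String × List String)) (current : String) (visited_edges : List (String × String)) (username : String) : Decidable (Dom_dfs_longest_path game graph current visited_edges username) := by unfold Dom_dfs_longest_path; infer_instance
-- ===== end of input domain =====

-- B rewrites A's recursive backtracking DFS as an iterative explicit-stack search (objective: alternative,
-- same cost).  Both the Python A and the Python B add edges to `visited_edges` and remove them again
-- before returning, so the set is unchanged when either returns; the equivalence proved is about the
-- return value.

-- ===== PORT A =====

-- tuple(sorted((a, b))) for two strings (Python sorts the pair lexicographically)
def pvEdge (a b : String) : String × String := if b < a then (b, a) else (a, b)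

-- helper is_blocked_vertex; `game["settlements"]`/`game["cities"]` raise KeyError when the key is
-- missing — those inputs are excluded by Pre_ below, here the lookup is totalised with `.getD []`.
-- Python's `x or y` takes y when x is falsy, i.e. None or the empty string.
def is_blocked_vertex (game : List (String × List (String × String))) (vertex : String) (username : String) : Bool :=
  let settlements := PySem.Dict.getD (PySem.Dict.mk game) "settlements" []
  let cities := PySem.Dict.getD (PySem.Dict.mk game) "cities" []
  let owner : Option String :=
    match PySem.Dict.get? (PySem.Dict.mk settlements) vertex with
    | some t => if t = "" then PySem.Dict.get? (PySem.Dict.mk cities) vertex else some t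
    | none => PySem.Dict.get? (PySem.Dict.mk cities) vertex
  match owner with
  | none => false
  | some o => o ≠ username

-- the distinct undirected edges mentioned by the adjacency dict (used only to size the fuel)
def pvEdges (graph : List (String × List String)) : List (String × String) :=
  PySem.List.dedup (graph.flatMap (fun p => p.2.map (fun n => pvEdge p.1 n)))

-- A's recursion: fuel is a totality guard only; recursion depth is bounded by the number of distinct
-- graph edges (each level adds a fresh graph edge to visited), so fuel (pvEdges graph).length + 1 is never exhausted.
def pvARec (game : List (String × List (String × String))) (graph : List (String × List String)) (username : String) : Nat → String → PySem.Set (String × String) → Int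
  | 0, _, _ => 0
  | f + 1, current, visited =>
    ((PySem.Dict.getD (PySem.Dict.mk graph) current []).foldl
      (fun (st : Int × PySem.Set (String × String)) neighbor =>
        let edge := pvEdge current neighbor
        if PySem.Set.contains st.2 edge then st
        else if is_blocked_vertex game neighbor username then st
        else
          let ve1 := PySem.Set.add st.2 edge
          let length := 1 + pvARec game graph username f neighbor ve1
          let ml := max st.1 length
          let ve2 := (PySem.Set.remove? ve1 edge).getD ve1   -- visited_edges.remove(edge); edge was just added, so present
          (ml, ve2))
      (0, visited)).1

def dfs_longest_path (game : List (String × List (String × String))) (graph : List (String × List String)) (current : String) (visited_edges : List (String × String)) (username : String) : Int :=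
  pvARec game graph username ((pvEdges graph).length + 1) current visited_edges

-- ===== PORT B =====

-- total number of adjacency entries (sizes B's fuel)
def pvT (graph : List (String × List String)) : Nat := (graph.map (fun p => p.2.length)).sum

-- one machine step per fuel unit; a frame is (vertex, remaining neighbors, incoming edge).
-- The fuel is a totality guard only: the step count is bounded by the potential pvPhi proved below.
def pvBRun (game : List (String × List (String × String))) (graph : List (String × List String)) (username : String) : Nat → List (String × List String × Option (String × String)) → PySem.Set (String × String) → Int → Int → Int
  | 0, _, _, _, best => best
  | _ + 1, [], _, _, best => best
  | f + 1, (vertex, neighbors, edge_in) :: st, v, depth, best =>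
    match neighbors with
    | [] =>   -- iterator exhausted: pop, restore the incoming edge
      match edge_in with
      | some e => pvBRun game graph username f st ((PySem.Set.remove? v e).getD v) (depth - 1) best
      | none => pvBRun game graph username f st v depth best
    | n :: rest =>
      let edge := pvEdge vertex n
      if PySem.Set.contains v edge then
        pvBRun game graph username f ((vertex, rest, edge_in) :: st) v depth best
      else if is_blocked_vertex game n username then
        pvBRun game graph username f ((vertex, rest, edge_in) :: st) v depth best
      else
        pvBRun game graph username f
          ((n, PySem.Dict.getD (PySem.Dict.mk graph) n [], some edge) :: (vertex, rest, edge_in) :: st)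
          (PySem.Set.add v edge) (depth + 1) (if depth + 1 > best then depth + 1 else best)

def dfs_longest_path_alt (game : List (String × List (String × String))) (graph : List (String × List String)) (current : String) (visited_edges : List (String × String)) (username : String) : Int :=
  pvBRun game graph username ((pvT graph + 2) ^ ((pvEdges graph).length + 2))
    [(current, PySem.Dict.getD (PySem.Dict.mk graph) current [], none)] visited_edges 0 0

-- ===== PRECONDITION & SPEC =====
-- A raises KeyError (game["settlements"] / game["cities"]) when those keys are missing and the search
-- examines an unvisited edge.  Pre_ demands both keys, or that no unvisited edge leaves `current`
-- (then neither dict is touched).  This is slightly narrower than A's exact returning set: when only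
-- "cities" is missing, A still returns if every consulted vertex has a truthy settlement owner, because
-- `or` short-circuits the cities lookup (see cites in the claim).
def Pre_dfs_longest_path (game : List (String × List (String × String))) (graph : List (String × List String)) (current : String) (visited_edges : List (String × String)) (username : String) : Prop :=
  ((PySem.Dict.mk game).contains "settlements" = true ∧ (PySem.Dict.mk game).contains "cities" = true) ∨
  (∀ n ∈ PySem.Dict.getD (PySem.Dict.mk graph) current [], pvEdge current n ∈ visited_edges)
instance (game : List (String × List (String × String))) (graph : List (String × List String)) (current : String) (visited_edges : List (String × String)) (username : String) : Decidable (Pre_dfs_longest_path game graph current visited_edges username) := by unfold Pre_dfs_longest_path; infer_instance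

def pvWitness_dfs_longest_path : (List (String × List (String × String))) × (List (String × List String)) × String × (List (String × String)) × String :=
  ([("settlements", [("b", "u2")]), ("cities", [])], [("a", ["b"]), ("b", ["a"])], "a", [], "u1")

def Spec_dfs_longest_path (game : List (String × List (String × String))) (graph : List (String × List String)) (current : String) (visited_edges : List (String × String)) (username : String) (out : Int) : Prop := out = dfs_longest_path_alt game graph current visited_edges username
instance (game : List (String × List (String × String))) (graph : List (String × List String)) (current : String) (visited_edges : List (String × String)) (username : String) (out : Int) : Decidable (Spec_dfs_longest_path game graph current visited_edges username out) := by unfold Spec_dfs_longest_path; infer_instance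

-- ===== CLAIM (what is proved, stated in full; the proofs are below) =====
def Claim_equal_dfs_longest_path : Prop := ∀ (game : List (String × List (String × String))) (graph : List (String × List String)) (current : String) (visited_edges : List (String × String)) (username : String), Dom_dfs_longest_path game graph current visited_edges username → Pre_dfs_longest_path game graph current visited_edges username → Spec_dfs_longest_path game graph current visited_edges username (dfs_longest_path game graph current visited_edges username)

-- ===== LEMMAS AND PROOFS =====

-- ---- spec-side reference function: the clean fueled recursion L and its body Lrem ----

def pvLrem (game : List (String × List (String × String))) (username : String) (rec : String → PySem.Set (String × String) → Int) (x : String) (v : PySem.Set (String × String)) : List String → Int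
  | [] => 0
  | n :: r =>
    let e := pvEdge x n
    if PySem.Set.contains v e then pvLrem game username rec x v r
    else if is_blocked_vertex game n username then pvLrem game username rec x v r
    else max (1 + rec n (PySem.Set.add v e)) (pvLrem game username rec x v r)

def pvL (game : List (String × List (String × String))) (graph : List (String × List String)) (username : String) : Nat → String → PySem.Set (String × String) → Int
  | 0, _, _ => 0
  | f + 1, cur, v => pvLrem game username (pvL game graph username f) cur v (PySem.Dict.getD (PySem.Dict.mk graph) cur [])

-- number of distinct graph edges not yet visited
def pvU (graph : List (String × List String)) (v : PySem.Set (String × String)) : Nat :=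
  ((pvEdges graph).filter (fun e => !(PySem.Set.contains v e))).length

def pvCval (game : List (String × List (String × String))) (graph : List (String × List String)) (username : String) (cur : String) (v : PySem.Set (String × String)) : Int :=
  pvL game graph username (pvU graph v + 1) cur v

def pvCrem (game : List (String × List (String × String))) (graph : List (String × List String)) (username : String) (x : String) (v : PySem.Set (String × String)) (rem : List String) : Int :=
  pvLrem game username (fun n v' => pvCval game graph username n v') x v rem

-- abstract meaning of a machine state
def pvSpecRun (game : List (String × List (String × String))) (graph : List (String × List String)) (username : String) : List (String × List String × Option (String × String)) → PySem.Set (String × String) → Int → Int → Int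
  | [], _, _, b => b
  | (x, rem, ein) :: st, v, d, b =>
    let b' := max b (d + pvCrem game graph username x v rem)
    match ein with
    | some e => pvSpecRun game graph username st (PySem.Set.discard v e) (d - 1) b'
    | none => pvSpecRun game graph username st v d b'

-- machine-state invariant
def pvInv (graph : List (String × List String)) : List (String × List String × Option (String × String)) → PySem.Set (String × String) → Prop
  | [], _ => True
  | (x, rem, ein) :: st, v =>
    (∀ n ∈ rem, pvEdge x n ∈ pvEdges graph) ∧
    (match ein with
     | none => pvInv graph st v
     | some e => e ∈ pvEdges graph ∧ e ∈ v ∧ pvInv graph st (PySem.Set.discard v e))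

-- potential: strict upper bound on the number of remaining machine steps
def pvPhi (B : Nat) : List (String × List String × Option (String × String)) → Nat → Nat
  | [], _ => 0
  | (_, rem, _) :: st, u => (rem.length + 1) * B ^ u + pvPhi B st (u + 1)

-- ---- basic set lemmas ----

theorem pv_discard_add_self (v : PySem.Set (String × String)) (e : String × String) (he : e ∉ v) :
    PySem.Set.discard (PySem.Set.add v e) e = v := by
  rw [PySem.Set.add_of_not_mem he]
  unfold PySem.Set.discard
  rw [List.filter_append]
  have h1 : List.filter (fun y => !y == e) v = v :=
    List.filter_eq_self.2 (fun a ha => by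
      simp only [Bool.not_eq_eq_eq_not, Bool.not_true, beq_eq_false_iff_ne, ne_eq]
      rintro rfl; exact he ha)
  simp [h1]

theorem pv_remove_of_mem (v : PySem.Set (String × String)) (e : String × String) (he : e ∈ v) :
    (PySem.Set.remove? v e).getD v = PySem.Set.discard v e := by
  unfold PySem.Set.remove?
  simp [he]

theorem pv_remove_add_self (v : PySem.Set (String × String)) (e : String × String) (he : e ∉ v) :
    (PySem.Set.remove? (PySem.Set.add v e) e).getD (PySem.Set.add v e) = v := by
  rw [pv_remove_of_mem _ _ (by simp [PySem.Set.mem_add _ _ _]), pv_discard_add_self _ _ he]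


-- ---- counting lemmas ----

theorem pv_filter_split {α : Type} [DecidableEq α] (l : List α) (hl : l.Nodup) (e : α) (hel : e ∈ l)
    (p q : α → Bool) (hborder : p e = true) (hq : q e = false)
    (hagree : ∀ x ∈ l, x ≠ e → p x = q x) :
    (l.filter p).length = (l.filter q).length + 1 := by
  induction l with
  | nil => cases hel
  | cons a t ih =>
    rcases List.mem_cons.1 hel with rfl | hmem
    · have ht : ∀ x ∈ t, p x = q x := fun x hx =>
        hagree x (List.mem_cons_of_mem _ hx) (fun hxe => (List.nodup_cons.1 hl).1 (hxe ▸ hx))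
      have h2 : List.filter p t = List.filter q t := List.filter_congr ht
      simp [hborder, hq, h2]
    · have hne : a ≠ e := fun h => (List.nodup_cons.1 hl).1 (h ▸ hmem)
      have := ih (List.nodup_cons.1 hl).2 hmem (fun x hx hxe => hagree x (List.mem_cons_of_mem _ hx) hxe)
      simp only [List.filter_cons]
      rw [hagree a (List.mem_cons_self) hne]
      cases hqa : q a <;> simp [this]

theorem pvU_add (graph : List (String × List String)) (v : PySem.Set (String × String))
    (e : String × String) (he : e ∈ pvEdges graph) (hv : e ∉ v) :
    pvU graph v = pvU graph (PySem.Set.add v e) + 1 := by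
  unfold pvU
  apply pv_filter_split (pvEdges graph) (by unfold pvEdges; exact PySem.List.nodup_dedup _) e he
  · simp only [Bool.not_eq_eq_eq_not, Bool.not_true]
    rw [← Bool.not_eq_true]
    simpa [PySem.Set.contains_iff _ _] using hv
  · simp only [Bool.not_eq_false']
    exact (PySem.Set.contains_iff _ _).2 ((PySem.Set.mem_add _ _ _).2 (Or.inr rfl))
  · intro x hx hxe
    by_cases hxv : x ∈ v
    · rw [(PySem.Set.contains_iff _ _).2 hxv, (PySem.Set.contains_iff _ _).2 ((PySem.Set.mem_add _ _ _).2 (Or.inl hxv))]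
    · have h1 : PySem.Set.contains v x = false := by
        rw [← Bool.not_eq_true]; simpa [PySem.Set.contains_iff _ _] using hxv
      have h2 : PySem.Set.contains (PySem.Set.add v e) x = false := by
        rw [← Bool.not_eq_true]
        simpa [PySem.Set.contains_iff, PySem.Set.mem_add _ _ _] using not_or.2 ⟨hxv, hxe⟩
      rw [h1, h2]

theorem pvU_discard (graph : List (String × List String)) (v : PySem.Set (String × String))
    (e : String × String) (he : e ∈ pvEdges graph) (hv : e ∈ v) :
    pvU graph (PySem.Set.discard v e) = pvU graph v + 1 := by
  unfold pvU
  apply pv_filter_split (pvEdges graph) (by unfold pvEdges; exact PySem.List.nodup_dedup _) e he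
  · simp only [Bool.not_eq_eq_eq_not, Bool.not_true]
    rw [← Bool.not_eq_true]
    simp only [PySem.Set.contains_iff, PySem.Set.mem_discard _ _ _]
    tauto
  · simp only [Bool.not_eq_false']
    exact (PySem.Set.contains_iff _ _).2 hv
  · intro x hx hxe
    by_cases hxv : x ∈ v
    · rw [(PySem.Set.contains_iff _ _).2 hxv, (PySem.Set.contains_iff _ _).2 ((PySem.Set.mem_discard _ _ _).2 ⟨hxv, hxe⟩)]
    · have h1 : PySem.Set.contains v x = false := by
        rw [← Bool.not_eq_true]; simpa [PySem.Set.contains_iff _ _] using hxv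
      have h2 : PySem.Set.contains (PySem.Set.discard v e) x = false := by
        rw [← Bool.not_eq_true]
        simp only [PySem.Set.contains_iff, PySem.Set.mem_discard _ _ _]
        tauto
      rw [h2, h1]

theorem pvU_pos (graph : List (String × List String)) (v : PySem.Set (String × String))
    (e : String × String) (he : e ∈ pvEdges graph) (hv : e ∉ v) : 1 ≤ pvU graph v := by
  have hc : PySem.Set.contains v e = false := by
    rw [← Bool.not_eq_true]; simpa [PySem.Set.contains_iff _ _] using hv
  have : e ∈ (pvEdges graph).filter (fun e => !(PySem.Set.contains v e)) :=
    List.mem_filter.2 ⟨he, by simp only [Bool.not_eq_true']; exact hc⟩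
  have := List.length_pos_of_mem this
  unfold pvU
  omega

theorem pvU_le (graph : List (String × List String)) (v : PySem.Set (String × String)) :
    pvU graph v ≤ (pvEdges graph).length := by
  exact List.length_filter_le _ _

-- ---- graph lemmas ----

theorem pv_edge_mem (graph : List (String × List String)) (x n : String)
    (h : n ∈ PySem.Dict.getD (PySem.Dict.mk graph) x []) : pvEdge x n ∈ pvEdges graph := by
  unfold PySem.Dict.getD PySem.Dict.get? at h
  cases hf : List.find? (fun p => p.1 == x) (PySem.Dict.mk graph).items with
  | none => rw [hf] at h; simp at h
  | some p =>
    rw [hf] at h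
    simp only [Option.map_some, Option.getD_some] at h
    have hpx : p.1 = x := by simpa using List.find?_some hf
    have hpmem : p ∈ graph := List.mem_of_find?_eq_some hf
    unfold pvEdges
    rw [PySem.List.mem_dedup]
    exact List.mem_flatMap.2 ⟨p, hpmem, List.mem_map.2 ⟨n, h, by rw [hpx]⟩⟩

theorem pv_adj_le (graph : List (String × List String)) (x : String) :
    (PySem.Dict.getD (PySem.Dict.mk graph) x []).length ≤ pvT graph := by
  unfold PySem.Dict.getD PySem.Dict.get?
  cases hf : List.find? (fun p => p.1 == x) (PySem.Dict.mk graph).items with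
  | none => simp [pvT]
  | some p =>
    simp only [Option.map_some, Option.getD_some]
    have hpmem : p ∈ graph := List.mem_of_find?_eq_some hf
    unfold pvT
    exact List.single_le_sum (fun x _ => Nat.zero_le x) _ (List.mem_map.2 ⟨p, hpmem, rfl⟩)

-- ---- nonnegativity ----

theorem pvLrem_nonneg (game : List (String × List (String × String))) (username : String)
    (rec : String → PySem.Set (String × String) → Int) (x : String) (v : PySem.Set (String × String))
    (l : List String) : 0 ≤ pvLrem game username rec x v l := by
  induction l with
  | nil => simp [pvLrem]
  | cons n r ih =>
    simp only [pvLrem]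
    split
    · exact ih
    · split
      · exact ih
      · exact le_trans ih (le_max_right _ _)

-- ---- fuel irrelevance for pvL ----

theorem pvL_irrel (game : List (String × List (String × String))) (graph : List (String × List String))
    (username : String) (k : Nat) : ∀ (f g : Nat) (cur : String) (v : PySem.Set (String × String)),
    pvU graph v ≤ k → pvU graph v < f → pvU graph v < g →
    pvL game graph username f cur v = pvL game graph username g cur v := by
  induction k using Nat.strong_induction_on with
  | _ k ih =>
    intro f g cur v hk hf hg
    cases f with
    | zero => omega
    | succ f =>
      cases g with
      | zero => omega
      | succ g =>
        simp only [pvL]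
        have hmem : ∀ n ∈ PySem.Dict.getD (PySem.Dict.mk graph) cur [], pvEdge cur n ∈ pvEdges graph :=
          fun n hn => pv_edge_mem graph cur n hn
        revert hmem
        generalize (PySem.Dict.getD (PySem.Dict.mk graph) cur []) = l
        intro hmem
        induction l with
        | nil => rfl
        | cons n r ihl =>
          have hr := ihl (fun m hm => hmem m (List.mem_cons_of_mem _ hm))
          simp only [pvLrem]
          by_cases hc : PySem.Set.contains v (pvEdge cur n) = true
          · rw [if_pos hc, if_pos hc, hr]
          · rw [if_neg hc, if_neg hc]
            by_cases hb : is_blocked_vertex game n username = true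
            · rw [if_pos hb, if_pos hb, hr]
            · rw [if_neg hb, if_neg hb, hr]
              have hnv : pvEdge cur n ∉ v := fun h => hc ((PySem.Set.contains_iff _ _).2 h)
              have hE := hmem n List.mem_cons_self
              have hU := pvU_add graph v _ hE hnv
              have hpos := pvU_pos graph v _ hE hnv
              rw [ih (pvU graph (PySem.Set.add v (pvEdge cur n))) (by omega) f g n _ (le_refl _)
                (by omega) (by omega)]

theorem pvCval_eq_pvCrem (game : List (String × List (String × String))) (graph : List (String × List String))
    (username : String) (x : String) (v : PySem.Set (String × String)) :
    pvCval game graph username x v = pvCrem game graph username x v (PySem.Dict.getD (PySem.Dict.mk graph) x []) := by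
  unfold pvCval pvCrem
  simp only [pvL]
  have hmem : ∀ n ∈ PySem.Dict.getD (PySem.Dict.mk graph) x [], pvEdge x n ∈ pvEdges graph :=
    fun n hn => pv_edge_mem graph x n hn
  revert hmem
  generalize (PySem.Dict.getD (PySem.Dict.mk graph) x []) = l
  intro hmem
  induction l with
  | nil => rfl
  | cons n r ihl =>
    have hr := ihl (fun m hm => hmem m (List.mem_cons_of_mem _ hm))
    simp only [pvLrem]
    by_cases hc : PySem.Set.contains v (pvEdge x n) = true
    · rw [if_pos hc, if_pos hc, hr]
    · rw [if_neg hc, if_neg hc]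
      by_cases hb : is_blocked_vertex game n username = true
      · rw [if_pos hb, if_pos hb, hr]
      · rw [if_neg hb, if_neg hb, hr]
        have hnv : pvEdge x n ∉ v := fun h => hc ((PySem.Set.contains_iff _ _).2 h)
        have hE := hmem n List.mem_cons_self
        have hU := pvU_add graph v _ hE hnv
        have hpos := pvU_pos graph v _ hE hnv
        unfold pvCval
        rw [pvL_irrel game graph username (pvU graph v) (pvU graph v)
          (pvU graph (PySem.Set.add v (pvEdge x n)) + 1) n _ (by omega) (by omega) (by omega)]

-- ---- A's port equals L ----

theorem pvARec_eq_pvL (game : List (String × List (String × String))) (graph : List (String × List String))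
    (username : String) : ∀ (f : Nat) (cur : String) (v : PySem.Set (String × String)),
    pvARec game graph username f cur v = pvL game graph username f cur v := by
  intro f
  induction f with
  | zero => intro cur v; rfl
  | succ f ih =>
    intro cur v
    simp only [pvARec, pvL]
    have key : ∀ (l : List String) (m : Int), 0 ≤ m →
        List.foldl
          (fun (st : Int × PySem.Set (String × String)) neighbor =>
            let edge := pvEdge cur neighbor
            if PySem.Set.contains st.2 edge then st
            else if is_blocked_vertex game neighbor username then st
            else
              let ve1 := PySem.Set.add st.2 edge
              let length := 1 + pvARec game graph username f neighbor ve1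
              let ml := max st.1 length
              let ve2 := (PySem.Set.remove? ve1 edge).getD ve1
              (ml, ve2))
          (m, v) l
        = (max m (pvLrem game username (pvL game graph username f) cur v l), v) := by
      intro l
      induction l with
      | nil =>
        intro m hm
        simp only [List.foldl_nil, pvLrem]
        rw [max_eq_left hm]
      | cons n r ihl =>
        intro m hm
        simp only [List.foldl_cons, pvLrem]
        by_cases hc : PySem.Set.contains v (pvEdge cur n) = true
        · rw [if_pos hc, if_pos hc, ihl m hm]
        · rw [if_neg hc, if_neg hc]
          by_cases hb : is_blocked_vertex game n username = true
          · rw [if_pos hb, if_pos hb, ihl m hm]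
          · rw [if_neg hb, if_neg hb]
            have hnv : pvEdge cur n ∉ v := fun h => hc ((PySem.Set.contains_iff _ _).2 h)
            rw [pv_remove_add_self v _ hnv]
            rw [ihl (max m (1 + pvARec game graph username f n (PySem.Set.add v (pvEdge cur n))))
              (le_trans hm (le_max_left _ _))]
            rw [ih n (PySem.Set.add v (pvEdge cur n))]
            rw [max_assoc]
    rw [key _ 0 (le_refl 0), max_eq_right (pvLrem_nonneg _ _ _ _ _ _)]

-- ---- potential lemmas ----

theorem pvPhi_mono (B : Nat) (hB : 1 ≤ B) (st : List (String × List String × Option (String × String))) :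
    ∀ (u u' : Nat), u ≤ u' → pvPhi B st u ≤ pvPhi B st u' := by
  induction st with
  | nil => intro u u' h; simp [pvPhi]
  | cons fr st ih =>
    intro u u' h
    obtain ⟨x, rem, ein⟩ := fr
    simp only [pvPhi]
    exact Nat.add_le_add (Nat.mul_le_mul_left _ (Nat.pow_le_pow_right hB h)) (ih (u + 1) (u' + 1) (by omega))

-- ---- the machine lemma ----

theorem pvL_nonneg (game : List (String × List (String × String))) (graph : List (String × List String))
    (username : String) (f : Nat) (cur : String) (v : PySem.Set (String × String)) :
    0 ≤ pvL game graph username f cur v := by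
  cases f with
  | zero => simp [pvL]
  | succ f => exact pvLrem_nonneg _ _ _ _ _ _

theorem pvCval_nonneg (game : List (String × List (String × String))) (graph : List (String × List String))
    (username : String) (cur : String) (v : PySem.Set (String × String)) :
    0 ≤ pvCval game graph username cur v := pvL_nonneg _ _ _ _ _ _

theorem pvBRun_eq_pvSpecRun (game : List (String × List (String × String))) (graph : List (String × List String))
    (username : String) : ∀ (fuel : Nat) (st : List (String × List String × Option (String × String)))
    (v : PySem.Set (String × String)) (d b : Int),
    pvPhi (pvT graph + 2) st (pvU graph v) ≤ fuel → pvInv graph st v → d ≤ b →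
    pvBRun game graph username fuel st v d b = pvSpecRun game graph username st v d b := by
  intro fuel
  induction fuel with
  | zero =>
    intro st v d b hphi hinv hdb
    cases st with
    | nil => rfl
    | cons fr st =>
      obtain ⟨x, rem, ein⟩ := fr
      exfalso
      have hpow : 0 < (pvT graph + 2) ^ (pvU graph v) := pow_pos (by omega) _
      simp only [pvPhi] at hphi
      have hmul : 0 < (rem.length + 1) * (pvT graph + 2) ^ (pvU graph v) :=
        Nat.mul_pos (by omega) hpow
      omega
  | succ f ih =>
    intro st v d b hphi hinv hdb
    cases st with
    | nil => rfl
    | cons fr st =>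
      obtain ⟨x, rem, ein⟩ := fr
      have hB1 : (0:Nat) < pvT graph + 2 := by omega
      have hpow : 0 < (pvT graph + 2) ^ (pvU graph v) := pow_pos hB1 _
      obtain ⟨hrem, hein⟩ := hinv
      cases rem with
      | nil =>
        simp only [pvPhi, List.length_nil] at hphi
        cases ein with
        | none =>
          simp only [pvBRun, pvSpecRun, pvCrem, pvLrem]
          rw [add_zero, max_eq_left hdb]
          have hmono := pvPhi_mono (pvT graph + 2) (by omega) st (pvU graph v) (pvU graph v + 1) (Nat.le_succ _)
          exact ih st v d b (by omega) hein hdb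
        | some e =>
          obtain ⟨heE, hev, hinv'⟩ := hein
          simp only [pvBRun, pvSpecRun, pvCrem, pvLrem]
          rw [pv_remove_of_mem v e hev, add_zero, max_eq_left hdb]
          apply ih
          · rw [pvU_discard graph v e heE hev]
            omega
          · exact hinv'
          · omega
      | cons n rest =>
        have hCrskip : ∀ h1 : PySem.Set.contains v (pvEdge x n) = true,
            pvCrem game graph username x v (n :: rest) = pvCrem game graph username x v rest := by
          intro h1; simp only [pvCrem, pvLrem]; rw [if_pos h1]
        have hCrskip2 : ∀ (h1 : ¬ PySem.Set.contains v (pvEdge x n) = true)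
            (h2 : is_blocked_vertex game n username = true),
            pvCrem game graph username x v (n :: rest) = pvCrem game graph username x v rest := by
          intro h1 h2; simp only [pvCrem, pvLrem]; rw [if_neg h1, if_pos h2]
        have hphiskip : pvPhi (pvT graph + 2) ((x, rest, ein) :: st) (pvU graph v) ≤ f := by
          simp only [pvPhi, List.length_cons] at hphi ⊢
          have hdist : (rest.length + 1 + 1) * (pvT graph + 2) ^ (pvU graph v)
              = (rest.length + 1) * (pvT graph + 2) ^ (pvU graph v) + (pvT graph + 2) ^ (pvU graph v) := by ring
          linarith
        have hinvskip : pvInv graph ((x, rest, ein) :: st) v :=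
          ⟨fun m hm => hrem m (List.mem_cons_of_mem _ hm), hein⟩
        by_cases hc : PySem.Set.contains v (pvEdge x n) = true
        · simp only [pvBRun]
          rw [if_pos hc, ih ((x, rest, ein) :: st) v d b hphiskip hinvskip hdb]
          cases ein <;> simp only [pvSpecRun, hCrskip hc]
        · by_cases hb : is_blocked_vertex game n username = true
          · simp only [pvBRun]
            rw [if_neg hc, if_pos hb, ih ((x, rest, ein) :: st) v d b hphiskip hinvskip hdb]
            cases ein <;> simp only [pvSpecRun, hCrskip2 hc hb]
          · -- push
            have hnv : pvEdge x n ∉ v := fun h => hc ((PySem.Set.contains_iff _ _).2 h)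
            have heE : pvEdge x n ∈ pvEdges graph := hrem n List.mem_cons_self
            have hU := pvU_add graph v _ heE hnv
            have hupos := pvU_pos graph v _ heE hnv
            have hadj := pv_adj_le graph n
            have hxp : (0:Nat) < (pvT graph + 2) ^ (pvU graph (PySem.Set.add v (pvEdge x n))) :=
              pow_pos hB1 _
            have key : (((PySem.Dict.getD (PySem.Dict.mk graph) n []).length + 1))
                  * (pvT graph + 2) ^ (pvU graph (PySem.Set.add v (pvEdge x n))) + 1
                ≤ (pvT graph + 2) ^ (pvU graph (PySem.Set.add v (pvEdge x n)) + 1) := by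
              have h1 : ((PySem.Dict.getD (PySem.Dict.mk graph) n []).length + 1)
                    * (pvT graph + 2) ^ (pvU graph (PySem.Set.add v (pvEdge x n)))
                  ≤ (pvT graph + 1) * (pvT graph + 2) ^ (pvU graph (PySem.Set.add v (pvEdge x n))) :=
                Nat.mul_le_mul_right _ (by omega)
              have h2 : (pvT graph + 1) * (pvT graph + 2) ^ (pvU graph (PySem.Set.add v (pvEdge x n)))
                    + (pvT graph + 2) ^ (pvU graph (PySem.Set.add v (pvEdge x n)))
                  = (pvT graph + 2) ^ (pvU graph (PySem.Set.add v (pvEdge x n)) + 1) := by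
                rw [pow_succ]; ring
              omega
            have hphipush : pvPhi (pvT graph + 2)
                ((n, PySem.Dict.getD (PySem.Dict.mk graph) n [], some (pvEdge x n)) :: (x, rest, ein) :: st)
                (pvU graph (PySem.Set.add v (pvEdge x n))) ≤ f := by
              simp only [pvPhi, List.length_cons] at hphi ⊢
              rw [hU] at hphi
              have hdist : (rest.length + 1 + 1) * (pvT graph + 2) ^ (pvU graph (PySem.Set.add v (pvEdge x n)) + 1)
                  = (rest.length + 1) * (pvT graph + 2) ^ (pvU graph (PySem.Set.add v (pvEdge x n)) + 1)
                    + (pvT graph + 2) ^ (pvU graph (PySem.Set.add v (pvEdge x n)) + 1) := by ring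
              linarith
            have hinvpush : pvInv graph
                ((n, PySem.Dict.getD (PySem.Dict.mk graph) n [], some (pvEdge x n)) :: (x, rest, ein) :: st)
                (PySem.Set.add v (pvEdge x n)) := by
              refine ⟨fun m hm => pv_edge_mem graph n m hm, heE, (PySem.Set.mem_add _ _ _).2 (Or.inr rfl), ?_⟩
              rw [pv_discard_add_self v _ hnv]
              exact hinvskip
            have hmax : (if d + 1 > b then d + 1 else b) = max b (d + 1) := by split_ifs <;> omega
            simp only [pvBRun]
            rw [if_neg hc, if_neg hb, hmax,
              ih _ (PySem.Set.add v (pvEdge x n)) (d + 1) (max b (d + 1)) hphipush hinvpush (le_max_right _ _)]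
            -- spec-side equality
            have hC1 : pvCrem game graph username n (PySem.Set.add v (pvEdge x n)) (PySem.Dict.getD (PySem.Dict.mk graph) n [])
                = pvCval game graph username n (PySem.Set.add v (pvEdge x n)) :=
              (pvCval_eq_pvCrem game graph username n _).symm
            have hC1n : 0 ≤ pvCval game graph username n (PySem.Set.add v (pvEdge x n)) :=
              pvCval_nonneg _ _ _ _ _
            have hCsplit : pvCrem game graph username x v (n :: rest)
                = max (1 + pvCval game graph username n (PySem.Set.add v (pvEdge x n)))
                    (pvCrem game graph username x v rest) := by
              simp only [pvCrem, pvLrem]; rw [if_neg hc, if_neg hb]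
            simp only [pvSpecRun, hC1]
            rw [pv_discard_add_self v _ hnv, add_sub_cancel_right]
            cases ein <;>
              · simp only [pvSpecRun]
                congr 1
                rw [hCsplit]
                omega

-- ===== VERDICT (by name: the statement is the Claim_ definition above) =====
theorem dfs_longest_path_spec : Claim_equal_dfs_longest_path := by
  unfold Claim_equal_dfs_longest_path
  intro game graph current visited_edges username _ _
  unfold Spec_dfs_longest_path dfs_longest_path dfs_longest_path_alt
  have hUle := pvU_le graph visited_edges
  rw [pvARec_eq_pvL game graph username ((pvEdges graph).length + 1) current visited_edges,
    pvL_irrel game graph username ((pvEdges graph).length) ((pvEdges graph).length + 1)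
      (pvU graph visited_edges + 1) current visited_edges hUle (by omega) (by omega)]
  have hinv0 : pvInv graph [(current, PySem.Dict.getD (PySem.Dict.mk graph) current [], none)] visited_edges :=
    ⟨fun m hm => pv_edge_mem graph current m hm, trivial⟩
  have hphi0 : pvPhi (pvT graph + 2)
      [(current, PySem.Dict.getD (PySem.Dict.mk graph) current [], none)] (pvU graph visited_edges)
      ≤ (pvT graph + 2) ^ ((pvEdges graph).length + 2) := by
    simp only [pvPhi]
    have h1 : (PySem.Dict.getD (PySem.Dict.mk graph) current []).length + 1 ≤ pvT graph + 2 := by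
      have := pv_adj_le graph current; omega
    have h2 : (pvT graph + 2) ^ (pvU graph visited_edges) ≤ (pvT graph + 2) ^ ((pvEdges graph).length) :=
      Nat.pow_le_pow_right (by omega) hUle
    calc ((PySem.Dict.getD (PySem.Dict.mk graph) current []).length + 1) * (pvT graph + 2) ^ (pvU graph visited_edges) + 0
        ≤ (pvT graph + 2) * (pvT graph + 2) ^ ((pvEdges graph).length) := by
          have := Nat.mul_le_mul h1 h2; omega
      _ = (pvT graph + 2) ^ ((pvEdges graph).length + 1) := by rw [pow_succ]; ring
      _ ≤ (pvT graph + 2) ^ ((pvEdges graph).length + 2) := Nat.pow_le_pow_right (by omega) (by omega)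
  rw [pvBRun_eq_pvSpecRun game graph username _ _ visited_edges 0 0 hphi0 hinv0 (le_refl 0)]
  simp only [pvSpecRun]
  rw [zero_add, ← pvCval_eq_pvCrem game graph username current visited_edges,
    max_eq_right (pvCval_nonneg game graph username current visited_edges)]
  rfl
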